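-- pv_equiv track=rewrite | github.com/KevinMathisen/advent-of-code-2023 | 2/2.py | checkIfPossible
-- ===== SOURCE A (Python) =====
-- def checkIfPossible(game):
-- 	for set in game:
-- 		counts = {"red": 0, "green": 0, "blue": 0}
--
-- 		for draw in set:
-- 			counts[draw[1]] += draw[0]
--
-- 		for color, count in counts.items():
-- 			if count > requirements[color]:
-- 				return False
--
-- 	return True
--
-- requirements = {"red": 12, "green": 13, "blue": 14}
-- ===== SOURCE B (Python) =====
-- requirements = {"red": 12, "green": 13, "blue": 14}
--
-- def checkIfPossible(game):
--     maxima = {"red": 0, "green": 0, "blue": 0}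
--     for s in game:
--         counts = {"red": 0, "green": 0, "blue": 0}
--         for draw in s:
--             counts[draw[1]] += draw[0]
--         for color in list(maxima):
--             maxima[color] = max(maxima[color], counts[color])
--     return all(count <= requirements[color] for color, count in maxima.items())
-- ===== Notes on version B (the rewrite author's own statement) =====
-- stated objective: alternative
-- what changed: Instead of checking each set against the limits with an early return False, B accumulates a running per-color maximum over all sets and does a single final comparison against the requirements after the loop.
-- outside the precondition, e.g. on checkIfPossible([[(100, 'red')], [(1, 'purple')]]): A returns False, B raises KeyError
import Mathlib
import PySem

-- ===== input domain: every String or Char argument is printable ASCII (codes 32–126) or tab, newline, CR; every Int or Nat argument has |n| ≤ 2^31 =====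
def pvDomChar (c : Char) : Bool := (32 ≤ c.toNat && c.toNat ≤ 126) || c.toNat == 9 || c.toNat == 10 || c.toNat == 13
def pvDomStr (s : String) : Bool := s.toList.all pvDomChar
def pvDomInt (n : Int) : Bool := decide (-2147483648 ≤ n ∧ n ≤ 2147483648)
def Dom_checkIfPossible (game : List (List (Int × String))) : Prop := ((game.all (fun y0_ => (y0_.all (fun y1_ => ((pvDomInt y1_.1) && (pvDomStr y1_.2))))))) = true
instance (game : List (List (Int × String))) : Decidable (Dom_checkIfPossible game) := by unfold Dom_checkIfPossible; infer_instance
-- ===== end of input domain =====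

-- B replaces A's per-set early-return check by a running per-color maximum compared once after the loop.


-- ===== PORT A =====
-- requirements = {"red": 12, "green": 13, "blue": 14}
def pvReqs : PySem.Dict String Int := PySem.Dict.ofList [("red", 12), ("green", 13), ("blue", 14)]

-- counts = {"red": 0, "green": 0, "blue": 0}
def pvInitCounts : PySem.Dict String Int := PySem.Dict.ofList [("red", 0), ("green", 0), ("blue", 0)]

-- inner loop 'for draw in set: counts[draw[1]] += draw[0]'; Dict.modify is exact here
-- under Pre_ (the key is always present; Python raises KeyError on other colors, excluded by Pre_)
def pvCountSetA (s : List (Int × String)) : PySem.Dict String Int :=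
  s.foldl (fun d p => d.modify p.2 0 (· + p.1)) pvInitCounts

-- outer loop with the early 'return False'; the items loop is the boolean early-exit 'any'
def checkIfPossible : List (List (Int × String)) → Bool
  | [] => true
  | s :: rest =>
      let counts := pvCountSetA s
      if counts.items.any (fun p => decide (pvReqs.getD p.1 0 < p.2)) then false
      else checkIfPossible rest

-- ===== PORT B =====
def checkIfPossible_alt (game : List (List (Int × String))) : Bool :=
  let maxima := game.foldl (fun m s =>
      let counts := s.foldl (fun d p => d.modify p.2 0 (· + p.1)) pvInitCounts
      (PySem.Dict.keys m).foldl (fun m' c => m'.insert c (max (m'.getD c 0) (counts.getD c 0))) m)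
    pvInitCounts
  maxima.items.all (fun p => decide (p.2 ≤ pvReqs.getD p.1 0))

-- ===== PRECONDITION & SPEC =====
-- Pre_ excludes games containing a draw whose color is not red/green/blue: Python raises
-- KeyError there (A may still happen to return False first via its early exit, an accident
-- of exit order; B raises the same KeyError on such games).
def Pre_checkIfPossible (game : List (List (Int × String))) : Prop :=
  (game.all (fun s => s.all (fun p => p.2 == "red" || p.2 == "green" || p.2 == "blue"))) = true
instance (game : List (List (Int × String))) : Decidable (Pre_checkIfPossible game) := by unfold Pre_checkIfPossible; infer_instance

def pvWitness_checkIfPossible : (List (List (Int × String))) := [[(1, "red"), (2, "blue")], [(14, "green")]]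

def Spec_checkIfPossible (game : List (List (Int × String))) (out : Bool) : Prop := out = checkIfPossible_alt game
instance (game : List (List (Int × String))) (out : Bool) : Decidable (Spec_checkIfPossible game out) := by unfold Spec_checkIfPossible; infer_instance

-- ===== CLAIM (what is proved, stated in full; the proofs are below) =====
def Claim_equal_checkIfPossible : Prop := ∀ (game : List (List (Int × String))), Dom_checkIfPossible game → Pre_checkIfPossible game → Spec_checkIfPossible game (checkIfPossible game)

-- ===== LEMMAS AND PROOFS =====

-- signed total of color c in one set
def pvCnt (c : String) (s : List (Int × String)) : Int :=
  ((s.filter (fun p => p.2 == c)).map (·.1)).sum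

-- 'this set is within all three limits'
def pvOk (s : List (Int × String)) : Bool :=
  decide (pvCnt "red" s ≤ 12) && decide (pvCnt "green" s ≤ 13) && decide (pvCnt "blue" s ≤ 14)

theorem pvModR (a b c x : Int) : (PySem.Dict.mk [("red",a),("green",b),("blue",c)]).modify "red" 0 (·+x) = PySem.Dict.mk [("red",a+x),("green",b),("blue",c)] := by
  simp [PySem.Dict.modify, PySem.Dict.insert, PySem.Dict.getD, PySem.Dict.get?, PySem.Dict.contains]

theorem pvModG (a b c x : Int) : (PySem.Dict.mk [("red",a),("green",b),("blue",c)]).modify "green" 0 (·+x) = PySem.Dict.mk [("red",a),("green",b+x),("blue",c)] := by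
  simp [PySem.Dict.modify, PySem.Dict.insert, PySem.Dict.getD, PySem.Dict.get?, PySem.Dict.contains]

theorem pvModB (a b c x : Int) : (PySem.Dict.mk [("red",a),("green",b),("blue",c)]).modify "blue" 0 (·+x) = PySem.Dict.mk [("red",a),("green",b),("blue",c+x)] := by
  simp [PySem.Dict.modify, PySem.Dict.insert, PySem.Dict.getD, PySem.Dict.get?, PySem.Dict.contains]


theorem pvCnt_cons (c : String) (p : Int × String) (t : List (Int × String)) :
    pvCnt c (p :: t) = (if p.2 == c then p.1 else 0) + pvCnt c t := by
  simp [pvCnt, List.filter_cons]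
  split <;> simp


theorem pvCount_shape (s : List (Int × String))
    (hv : s.all (fun p => p.2 == "red" || p.2 == "green" || p.2 == "blue") = true)
    (a b c : Int) :
    s.foldl (fun d p => d.modify p.2 0 (· + p.1)) (PySem.Dict.mk [("red", a), ("green", b), ("blue", c)])
      = PySem.Dict.mk [("red", a + pvCnt "red" s), ("green", b + pvCnt "green" s), ("blue", c + pvCnt "blue" s)] := by
  induction s generalizing a b c with
  | nil => simp [pvCnt]
  | cons p t ih =>
    simp only [List.all_cons, Bool.and_eq_true] at hv
    obtain ⟨hp, ht⟩ := hv
    rw [List.foldl_cons]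
    rcases Bool.or_eq_true_iff.mp hp with h | h3
    · rcases Bool.or_eq_true_iff.mp h with h1 | h2
      · have hc : p.2 = "red" := by simpa using h1
        rw [hc, pvModR, ih ht]
        simp [pvCnt_cons, hc]; ring_nf
      · have hc : p.2 = "green" := by simpa using h2
        rw [hc, pvModG, ih ht]
        simp [pvCnt_cons, hc]; ring_nf
    · have hc : p.2 = "blue" := by simpa using h3
      rw [hc, pvModB, ih ht]
      simp [pvCnt_cons, hc]; ring_nf


theorem pvInit_eq : pvInitCounts = PySem.Dict.mk [("red", 0), ("green", 0), ("blue", 0)] := by decide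


theorem pvA_eq_all (game : List (List (Int × String)))
    (hv : Pre_checkIfPossible game) :
    checkIfPossible game = game.all pvOk := by
  induction game with
  | nil => rfl
  | cons s rest ih =>
    simp only [Pre_checkIfPossible, List.all_cons, Bool.and_eq_true] at hv
    obtain ⟨hs, hrest⟩ := hv
    rw [checkIfPossible, List.all_cons, ← ih hrest]
    show (if (pvCountSetA s).items.any (fun p => decide (pvReqs.getD p.1 0 < p.2)) then false
      else checkIfPossible rest) = _
    rw [pvCountSetA, pvInit_eq, pvCount_shape s hs]
    simp only [List.any_cons, List.any_nil]
    have h1 : pvReqs.getD "red" 0 = 12 := by decide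
    have h2 : pvReqs.getD "green" 0 = 13 := by decide
    have h3 : pvReqs.getD "blue" 0 = 14 := by decide
    simp only [h1, h2, h3, zero_add]
    split_ifs with h
    · simp only [Bool.or_eq_true, decide_eq_true_eq, Bool.or_false] at h
      have : pvOk s = false := by
        simp only [pvOk, Bool.and_eq_false_iff, decide_eq_false_iff_not, not_le]
        rcases h with h | h | h
        · left; left; exact h
        · left; right; exact h
        · right; exact h
      rw [this, Bool.false_and]
    · simp only [Bool.or_eq_true, decide_eq_true_eq, Bool.or_false, not_or, not_lt] at h
      have : pvOk s = true := by
        simp only [pvOk, Bool.and_eq_true, decide_eq_true_eq]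
        exact ⟨⟨h.1, h.2.1⟩, h.2.2⟩
      rw [this, Bool.true_and]


theorem pvStepB (a b c x y z : Int) :
    (["red", "green", "blue"].foldl
        (fun m' c' => m'.insert c' (max (m'.getD c' 0) ((PySem.Dict.mk [("red", x), ("green", y), ("blue", z)]).getD c' 0)))
        (PySem.Dict.mk [("red", a), ("green", b), ("blue", c)]))
      = PySem.Dict.mk [("red", max a x), ("green", max b y), ("blue", max c z)] := by
  simp [PySem.Dict.insert, PySem.Dict.contains, PySem.Dict.getD, PySem.Dict.get?]


theorem pvMaxFold (game : List (List (Int × String)))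
    (hv : Pre_checkIfPossible game) (a b c : Int) :
    game.foldl (fun m s =>
        List.foldl (fun m' c' => m'.insert c'
            (max (m'.getD c' 0)
              ((s.foldl (fun d p => d.modify p.2 0 (· + p.1))
                  (PySem.Dict.mk [("red", 0), ("green", 0), ("blue", 0)])).getD c' 0)))
          m (PySem.Dict.keys m))
      (PySem.Dict.mk [("red", a), ("green", b), ("blue", c)])
    = PySem.Dict.mk
        [("red", game.foldl (fun acc s => max acc (pvCnt "red" s)) a),
         ("green", game.foldl (fun acc s => max acc (pvCnt "green" s)) b),
         ("blue", game.foldl (fun acc s => max acc (pvCnt "blue" s)) c)] := by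
  induction game generalizing a b c with
  | nil => rfl
  | cons s rest ih =>
    simp only [Pre_checkIfPossible, List.all_cons, Bool.and_eq_true] at hv
    obtain ⟨hs, hrest⟩ := hv
    rw [List.foldl_cons]
    simp only [pvCount_shape s hs, zero_add]
    have hk : PySem.Dict.keys (PySem.Dict.mk [("red", a), ("green", b), ("blue", c)]) = ["red", "green", "blue"] := by
      simp [PySem.Dict.keys]
    rw [hk, pvStepB, ih hrest]
    rfl


theorem pvFoldMax_le (game : List (List (Int × String))) (f : List (Int × String) → Int) (a r : Int) :
    decide (game.foldl (fun acc s => max acc (f s)) a ≤ r)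
      = (decide (a ≤ r) && game.all (fun s => decide (f s ≤ r))) := by
  induction game generalizing a with
  | nil => simp
  | cons s rest ih =>
    rw [List.foldl_cons, ih, List.all_cons]
    have : decide (max a (f s) ≤ r) = (decide (a ≤ r) && decide (f s ≤ r)) := by
      simp
    rw [this, Bool.and_assoc]


theorem pvAll_split (game : List (List (Int × String))) :
    game.all pvOk
      = ((game.all fun s => decide (pvCnt "red" s ≤ 12)) &&
         ((game.all fun s => decide (pvCnt "green" s ≤ 13)) &&
          (game.all fun s => decide (pvCnt "blue" s ≤ 14)))) := by
  induction game with
  | nil => rfl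
  | cons s rest ih =>
    simp only [List.all_cons, ih, pvOk]
    ac_rfl


theorem pvB_eq_all (game : List (List (Int × String)))
    (hv : Pre_checkIfPossible game) :
    checkIfPossible_alt game = game.all pvOk := by
  rw [checkIfPossible_alt]
  simp only [pvInit_eq]
  rw [pvMaxFold game hv 0 0 0]
  simp only [List.all_cons, List.all_nil]
  have h1 : pvReqs.getD "red" 0 = 12 := by decide
  have h2 : pvReqs.getD "green" 0 = 13 := by decide
  have h3 : pvReqs.getD "blue" 0 = 14 := by decide
  simp only [h1, h2, h3, Bool.and_true]
  rw [pvFoldMax_le game _ 0 12, pvFoldMax_le game _ 0 13, pvFoldMax_le game _ 0 14, pvAll_split]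
  simp

-- ===== VERDICT (by name: the statement is the Claim_ definition above) =====
theorem checkIfPossible_spec : Claim_equal_checkIfPossible := by
  intro game _ hpre
  unfold Spec_checkIfPossible
  rw [pvA_eq_all game hpre, pvB_eq_all game hpre]
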